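-- pv_equiv track=rewrite | github.com/kelleys2009-cmd/_All_About_Team_GSD | code/market_data/notifier_slo_state_store.py | redact_notifier_slo_state_env
-- ===== SOURCE A (Python) =====
-- def redact_notifier_slo_state_env(
--     env: dict[str, str],
-- ) -> dict[str, str]:
--     redacted = dict(env)
--     secret_keys = [
--         "TEAM_GSD_NOTIFIER_SLO_REDIS_PASSWORD",
--         "TEAM_GSD_NOTIFIER_SLO_REDIS_SSL_KEYFILE",
--     ]
--     for key in secret_keys:
--         if key in redacted and redacted[key]:
--             redacted[key] = "***REDACTED***"
--     return redacted
-- ===== SOURCE B (Python) =====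
-- _SECRET_KEYS = {
--     "TEAM_GSD_NOTIFIER_SLO_REDIS_PASSWORD",
--     "TEAM_GSD_NOTIFIER_SLO_REDIS_SSL_KEYFILE",
-- }
--
--
-- def redact_notifier_slo_state_env(
--     env: dict[str, str],
-- ) -> dict[str, str]:
--     return {
--         k: ("***REDACTED***" if k in _SECRET_KEYS and v else v)
--         for k, v in env.items()
--     }
-- ===== Notes on version B (the rewrite author's own statement) =====
-- stated objective: idiomatic
-- what changed: Instead of copying the dict and then doing two targeted key lookups/overwrites, B is a single dict comprehension over env.items() that redacts an entry exactly when its key is in a constant secret-name set and its value is truthy; the loop is driven by the env entries rather than by the list of secret keys.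
import Mathlib
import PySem

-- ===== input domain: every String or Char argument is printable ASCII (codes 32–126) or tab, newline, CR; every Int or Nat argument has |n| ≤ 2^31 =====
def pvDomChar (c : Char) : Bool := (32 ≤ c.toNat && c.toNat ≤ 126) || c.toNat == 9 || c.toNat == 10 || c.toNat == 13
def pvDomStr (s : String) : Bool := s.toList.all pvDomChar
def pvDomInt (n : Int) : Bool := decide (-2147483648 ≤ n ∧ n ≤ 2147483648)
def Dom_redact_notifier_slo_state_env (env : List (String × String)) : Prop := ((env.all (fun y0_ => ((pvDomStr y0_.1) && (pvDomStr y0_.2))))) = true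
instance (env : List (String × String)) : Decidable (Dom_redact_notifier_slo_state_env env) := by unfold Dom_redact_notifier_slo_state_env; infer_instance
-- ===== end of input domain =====

-- B redacts by one pass over env.items() against a constant secret-name set, instead of A's
-- copy-then-two-targeted-lookups; same values, objective: idiomatic (same cost).

-- ===== PORT A =====
-- literal port of A: copy env into a dict, then for each of the two secret keys,
-- overwrite when present with a truthy (nonempty) value; return the dict's items.
def redact_notifier_slo_state_env (env : List (String × String)) : List (String × String) :=
  let redacted : PySem.Dict String String := PySem.Dict.ofList env
  let secret_keys : List String :=
    ["TEAM_GSD_NOTIFIER_SLO_REDIS_PASSWORD", "TEAM_GSD_NOTIFIER_SLO_REDIS_SSL_KEYFILE"]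
  let final := secret_keys.foldl
    (fun d key => if d.contains key && (d.getD key "" != "") then d.insert key "***REDACTED***" else d)
    redacted
  final.items

-- ===== PORT B =====
-- literal port of B: a single comprehension over env's entries, redacting an entry
-- exactly when its key is in the secret set and its value is truthy (nonempty).
def pvSecretKeys : List String :=
  ["TEAM_GSD_NOTIFIER_SLO_REDIS_PASSWORD", "TEAM_GSD_NOTIFIER_SLO_REDIS_SSL_KEYFILE"]

def redact_notifier_slo_state_env_alt (env : List (String × String)) : List (String × String) :=
  env.map (fun p => if pvSecretKeys.contains p.1 && p.2 != "" then (p.1, "***REDACTED***") else p)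

-- ===== PRECONDITION & SPEC =====
-- Pre_ requires the association list's keys to be distinct: a list with duplicate keys does not
-- represent any Python dict (A's declared input type dict[str, str]), so A never receives one.
def Pre_redact_notifier_slo_state_env (env : List (String × String)) : Prop :=
  (env.map Prod.fst).Nodup
instance (env : List (String × String)) : Decidable (Pre_redact_notifier_slo_state_env env) := by unfold Pre_redact_notifier_slo_state_env; infer_instance

def pvWitness_redact_notifier_slo_state_env : (List (String × String)) :=
  [("TEAM_GSD_NOTIFIER_SLO_REDIS_PASSWORD", "hunter2"), ("HOME", "/root"), ("TEAM_GSD_NOTIFIER_SLO_REDIS_SSL_KEYFILE", "")]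

def Spec_redact_notifier_slo_state_env (env : List (String × String)) (out : List (String × String)) : Prop := out = redact_notifier_slo_state_env_alt env
instance (env : List (String × String)) (out : List (String × String)) : Decidable (Spec_redact_notifier_slo_state_env env out) := by unfold Spec_redact_notifier_slo_state_env; infer_instance

-- ===== CLAIM (what is proved, stated in full; the proofs are below) =====
def Claim_equal_redact_notifier_slo_state_env : Prop := ∀ (env : List (String × String)), Dom_redact_notifier_slo_state_env env → Pre_redact_notifier_slo_state_env env → Spec_redact_notifier_slo_state_env env (redact_notifier_slo_state_env env)

-- ===== LEMMAS AND PROOFS =====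

theorem pv_witness_ok :
    Dom_redact_notifier_slo_state_env pvWitness_redact_notifier_slo_state_env ∧
    Pre_redact_notifier_slo_state_env pvWitness_redact_notifier_slo_state_env := by decide

-- one iteration of A's loop, described as a map over the dict's items
theorem pv_step_items (d : PySem.Dict String String) (hnd : d.keys.Nodup) (k : String) :
    (if d.contains k && (d.getD k "" != "") then d.insert k "***REDACTED***" else d).items
      = d.items.map (fun p => if p.1 = k ∧ p.2 ≠ "" then (k, "***REDACTED***") else p) := by
  by_cases hc : d.contains k = true
  · by_cases hv : d.getD k "" = ""
    · rw [if_neg (by simp [hc, hv])]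
      refine ((List.map_congr_left ?_).trans d.items.map_id).symm
      intro p hp
      by_cases hk : p.1 = k
      · have h2 : p.2 = d.getD k "" :=
          (PySem.Dict.getD_of_mem_items (d := d) (k := k) (v := p.2) (by rw [← hk]; exact hp) hnd (d0 := "")).symm
        simp [hk, h2, hv]
      · simp [hk]
    · rw [if_pos (by simp [hc, hv]), PySem.Dict.items_insert_of_contains _ _ hc]
      refine List.map_congr_left ?_
      intro p hp
      by_cases hk : p.1 = k
      · have h2 : p.2 = d.getD k "" :=
          (PySem.Dict.getD_of_mem_items (d := d) (k := k) (v := p.2) (by rw [← hk]; exact hp) hnd (d0 := "")).symm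
        simp [hk, h2, hv]
      · simp [hk]
  · rw [if_neg (by simp [hc])]
    refine ((List.map_congr_left ?_).trans d.items.map_id).symm
    intro p hp
    have hne : p.1 ≠ k := by
      intro hk
      apply hc
      have := hk ▸ PySem.Dict.mem_keys_of_mem_items _ hp
      simpa [PySem.Dict.contains_eq_decide_mem_keys] using this
    simp [hne]

theorem pv_step_keys (d : PySem.Dict String String) (k : String) :
    (if d.contains k && (d.getD k "" != "") then d.insert k "***REDACTED***" else d).keys = d.keys := by
  split
  · next h => exact PySem.Dict.keys_insert_of_contains d "***REDACTED***" (Bool.and_elim_left h)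
  · rfl

theorem pv_ofList_items (l : List (String × String)) (h : (l.map Prod.fst).Nodup) :
    (PySem.Dict.ofList l : PySem.Dict String String).items = l := by
  have := PySem.Dict.items_foldl_insert_fresh (d := (PySem.Dict.empty : PySem.Dict String String))
    (l := l) (k := Prod.fst) (v := Prod.snd) (by intro a _; simp) h
  simpa [PySem.Dict.ofList] using this

-- ===== VERDICT (by name: the statement is the Claim_ definition above) =====
theorem redact_notifier_slo_state_env_spec : Claim_equal_redact_notifier_slo_state_env := by
  intro env _ hpre
  show _ = _
  unfold redact_notifier_slo_state_env redact_notifier_slo_state_env_alt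
  simp only [List.foldl]
  set d0 : PySem.Dict String String := PySem.Dict.ofList env with hd0
  have hnd0 : d0.keys.Nodup := PySem.Dict.nodup_keys_ofList env
  set d1 := (if d0.contains "TEAM_GSD_NOTIFIER_SLO_REDIS_PASSWORD" && (d0.getD "TEAM_GSD_NOTIFIER_SLO_REDIS_PASSWORD" "" != "") then d0.insert "TEAM_GSD_NOTIFIER_SLO_REDIS_PASSWORD" "***REDACTED***" else d0) with hd1
  have hnd1 : d1.keys.Nodup := by rw [hd1, pv_step_keys]; exact hnd0
  rw [pv_step_items d1 hnd1 "TEAM_GSD_NOTIFIER_SLO_REDIS_SSL_KEYFILE", hd1,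
    pv_step_items d0 hnd0 "TEAM_GSD_NOTIFIER_SLO_REDIS_PASSWORD", pv_ofList_items env hpre,
    List.map_map]
  refine List.map_congr_left ?_
  intro p _
  by_cases h1 : p.1 = "TEAM_GSD_NOTIFIER_SLO_REDIS_PASSWORD"
  · by_cases hv : p.2 = "" <;> simp [Function.comp, h1, hv, pvSecretKeys]
  · by_cases h2 : p.1 = "TEAM_GSD_NOTIFIER_SLO_REDIS_SSL_KEYFILE"
    · by_cases hv : p.2 = "" <;> simp [Function.comp, h2, hv, pvSecretKeys]
    · simp [Function.comp, h1, h2, pvSecretKeys]
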